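-- pv_equiv track=rewrite | github.com/djmahe4/Crick-Predict | numerology.py | calculate_naamank
-- ===== SOURCE A (Python) =====
-- def calculate_naamank(name):
--     aldict = {'a': 1, 'j': 1, 's': 1, 'b': 2, 'k': 2, 't': 2, 'c': 3, 'l': 3, 'u': 3, 'd': 4, 'm': 4, 'v': 4, 'e': 5, 'n': 5, 'w': 5, 'f': 6, 'o': 6, 'x': 6, 'g': 7, 'p': 7, 'y': 7, 'h': 8, 'q': 8, 'z': 8, 'i': 9, 'r': 9}
--     """Calculates Naamank (sum of numerological letter values)"""
--     name_sum = 0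
--     for letter in name.lower().strip():
--         if letter != " ":
--             number = aldict.get(letter, 0)  # Initialize number with 0 if letter not found
--             name_sum += number
--
--     while name_sum > 9:
--         sum_digits = 0
--         for digit in str(name_sum):
--             sum_digits += int(digit)
--         name_sum = sum_digits
--     if name_sum +3>9:
--       name_sum=name_sum-3
--     else:
--       name_sum=name_sum+3
--     return name_sum
-- ===== SOURCE B (Python) =====
-- def calculate_naamank(name):
--     """Letter values via the arithmetic rule (ord-97)%9+1 instead of a dict, and a closed-form digital root instead of the digit-summing while-loop."""
--     total = 0
--     for ch in name.lower().strip():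
--         if 'a' <= ch <= 'z':
--             total += (ord(ch) - 97) % 9 + 1
--     root = 0 if total == 0 else 1 + (total - 1) % 9
--     return root - 3 if root + 3 > 9 else root + 3
-- ===== Notes on version B (the rewrite author's own statement) =====
-- stated objective: simpler
-- what changed: The 26-entry letter-value dict is replaced by the arithmetic rule (ord(c)-97)%9+1 on 'a'..'z', and the iterative repeated digit-summing while-loop (str()/int() round trips) is replaced by the closed-form digital root 1 + (total-1)%9 (0 for total 0); the redundant space check disappears since non-letters contribute 0.
import Mathlib
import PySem

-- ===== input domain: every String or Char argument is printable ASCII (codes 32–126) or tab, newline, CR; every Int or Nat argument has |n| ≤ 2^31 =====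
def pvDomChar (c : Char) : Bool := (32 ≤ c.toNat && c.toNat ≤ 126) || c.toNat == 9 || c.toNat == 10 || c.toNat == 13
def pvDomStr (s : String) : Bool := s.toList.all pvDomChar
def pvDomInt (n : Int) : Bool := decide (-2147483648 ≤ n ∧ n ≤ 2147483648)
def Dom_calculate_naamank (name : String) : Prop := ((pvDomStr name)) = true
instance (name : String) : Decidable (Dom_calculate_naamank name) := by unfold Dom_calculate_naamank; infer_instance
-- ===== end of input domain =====

-- B replaces A's dict of letter values by the arithmetic rule (ord(c)-97) % 9 + 1 on 'a'..'z'
-- and A's iterative digit-summing while-loop by the closed-form digital root 1 + (total-1) % 9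
-- (0 when total = 0): objective 'simpler'.

-- ===== PORT A =====
-- the Python dict literal (all keys distinct), A's lookup table
def aldict : PySem.Dict Char Int := PySem.Dict.ofList
  [('a',1),('j',1),('s',1),('b',2),('k',2),('t',2),('c',3),('l',3),('u',3),
   ('d',4),('m',4),('v',4),('e',5),('n',5),('w',5),('f',6),('o',6),('x',6),
   ('g',7),('p',7),('y',7),('h',8),('q',8),('z',8),('i',9),('r',9)]

-- "for digit in str(name_sum): sum_digits += int(digit)" — int(digit) never raises here
-- (str of the nonnegative name_sum has only digit chars), so ofChars? … |>.getD 0 is exact there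
def digitSumA (n : Int) : Int :=
  (PySem.Int.toChars n).foldl (fun acc c => acc + ((PySem.Int.ofChars? [c]).getD 0)) 0

-- ---- lemmas the port needs for termination of the while loop (cited in decreasing_by) ----
lemma toDigitsCore_eq_digits : ∀ (n : Nat), 0 < n → ∀ (f : Nat) (acc : List Char), n < f →
    Nat.toDigitsCore 10 f n acc = ((Nat.digits 10 n).map Nat.digitChar).reverse ++ acc := by
  intro n
  induction n using Nat.strong_induction_on with
  | _ n ih =>
    intro hn f acc hf
    match f, hf with
    | f + 1, hf =>
      rw [Nat.toDigitsCore, Nat.digits_def' (by norm_num : 1 < 10) hn]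
      by_cases h : n / 10 = 0
      · simp [h]
      · rw [if_neg h,
          ih (n / 10) (Nat.div_lt_self hn (by norm_num)) (Nat.pos_of_ne_zero h) f
            (Nat.digitChar (n % 10) :: acc) (by omega)]
        simp
lemma toChars_natCast (n : Nat) : PySem.Int.toChars (n : Int) = Nat.toDigits 10 n := by
  simp [PySem.Int.toChars]

lemma ofChars_digitChar {d : Nat} (hd : d < 10) :
    (PySem.Int.ofChars? [Nat.digitChar d]).getD 0 = (d : Int) := by
  interval_cases d <;> decide

lemma foldl_map_digitChar (l : List Nat) (hl : ∀ d ∈ l, d < 10) (a : Int) :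
    (l.map Nat.digitChar).foldl (fun acc c => acc + ((PySem.Int.ofChars? [c]).getD 0)) a
      = a + (l.sum : Int) := by
  induction l generalizing a with
  | nil => simp
  | cons d l ih =>
    simp only [List.map_cons, List.foldl_cons, List.sum_cons,
      ofChars_digitChar (hl d (List.mem_cons_self ..))]
    rw [ih (fun x hx => hl x (List.mem_cons_of_mem _ hx))]
    push_cast; ring

lemma digitSumA_eq (n : Nat) : digitSumA (n : Int) = ((Nat.digits 10 n).sum : Int) := by
  rcases Nat.eq_zero_or_pos n with h | h
  · subst h; decide
  · unfold digitSumA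
    rw [toChars_natCast, Nat.toDigits,
      toDigitsCore_eq_digits n h (n + 1) [] (Nat.lt_succ_self n), List.append_nil,
      ← List.map_reverse,
      foldl_map_digitChar _ (fun d hd => Nat.digits_lt_base (by norm_num)
        (List.mem_reverse.mp hd)) 0, List.sum_reverse, zero_add]

lemma digitSumA_toNat_lt {n : Int} (h : 9 < n) : (digitSumA n).toNat < n.toNat := by
  have h0 : n = ((n.toNat : Nat) : Int) := (Int.toNat_of_nonneg (by omega)).symm
  rw [h0, digitSumA_eq]
  have h10 : 10 ≤ n.toNat := by omega
  have hd : Nat.digits 10 n.toNat = n.toNat % 10 :: Nat.digits 10 (n.toNat / 10) :=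
    Nat.digits_def' (by norm_num) (by omega)
  have hle := Nat.digit_sum_le 10 (n.toNat / 10)
  rw [hd]
  simp only [List.sum_cons, Int.toNat_natCast]
  omega

-- the while loop: while name_sum > 9: name_sum = digit sum of name_sum
def reduceA (n : Int) : Int :=
  if h : 9 < n then reduceA (digitSumA n) else n
termination_by n.toNat
decreasing_by exact digitSumA_toNat_lt h

def calculate_naamank (name : String) : Int :=
  let name_sum := ((PySem.Str.strip (PySem.Str.lower name)).toList).foldl
    (fun acc c => if c ≠ ' ' then acc + (aldict.getD c 0) else acc) 0
  let name_sum := reduceA name_sum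
  if name_sum + 3 > 9 then name_sum - 3 else name_sum + 3

-- ===== PORT B =====
-- B: arithmetic letter rule (ord - 97) % 9 + 1 over the letters, then the closed-form digital root
def calculate_naamank_alt (name : String) : Int :=
  let total := ((PySem.Str.strip (PySem.Str.lower name)).toList).foldl
    (fun acc c => if 'a' ≤ c ∧ c ≤ 'z'
      then acc + (PySem.Int.mod ((c.toNat : Int) - 97) 9 + 1) else acc) 0
  let root := if total = 0 then 0 else 1 + PySem.Int.mod (total - 1) 9
  if root + 3 > 9 then root - 3 else root + 3

-- ===== PRECONDITION & SPEC =====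
def Spec_calculate_naamank (name : String) (out : Int) : Prop := out = calculate_naamank_alt name
instance (name : String) (out : Int) : Decidable (Spec_calculate_naamank name out) := by unfold Spec_calculate_naamank; infer_instance

-- ===== CLAIM (what is proved, stated in full; the proofs are below) =====
def Claim_equal_calculate_naamank : Prop := ∀ (name : String), Dom_calculate_naamank name → Spec_calculate_naamank name (calculate_naamank name)

-- ===== LEMMAS AND PROOFS =====

lemma char_le_iff_toNat_le (d c : Char) : (d ≤ c) ↔ d.toNat ≤ c.toNat := by
  rw [Char.le_def, UInt32.le_iff_toNat_le]; exact Iff.rfl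

-- A's dict value of any char equals B's arithmetic rule (0 outside 'a'..'z')
lemma aldict_getD_eq (c : Char) :
    aldict.getD c 0 = if 'a' ≤ c ∧ c ≤ 'z'
      then PySem.Int.mod ((c.toNat : Int) - 97) 9 + 1 else 0 := by
  by_cases h : 'a' ≤ c ∧ c ≤ 'z'
  · obtain ⟨h1, h2⟩ := h
    rw [if_pos ⟨h1, h2⟩, ← Char.ofNat_toNat c]
    rw [char_le_iff_toNat_le] at h1 h2
    have h1' : 97 ≤ c.toNat := h1
    have h2' : c.toNat ≤ 122 := h2
    interval_cases h : c.toNat <;> decide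
  · rw [if_neg h]
    have hkeys : ∀ p ∈ aldict.items, ¬ (p.1 == c) = true := by
      intro p hp
      simp only [beq_iff_eq]
      intro he
      have hmem : p ∈ [('a',(1:Int)),('j',1),('s',1),('b',2),('k',2),('t',2),('c',3),('l',3),('u',3),
        ('d',4),('m',4),('v',4),('e',5),('n',5),('w',5),('f',6),('o',6),('x',6),
        ('g',7),('p',7),('y',7),('h',8),('q',8),('z',8),('i',9),('r',9)] := by
        have hit : aldict.items = [('a',(1:Int)),('j',1),('s',1),('b',2),('k',2),('t',2),('c',3),('l',3),('u',3),
          ('d',4),('m',4),('v',4),('e',5),('n',5),('w',5),('f',6),('o',6),('x',6),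
          ('g',7),('p',7),('y',7),('h',8),('q',8),('z',8),('i',9),('r',9)] := by decide
        rwa [hit] at hp
      fin_cases hmem <;> exact h (by rw [← he]; exact ⟨by decide, by decide⟩)
    simp [PySem.Dict.getD, PySem.Dict.get?, List.find?_eq_none.mpr hkeys]

-- A's loop body (space guard + dict) equals B's loop body (letter guard + arithmetic)
lemma stepA_eq_stepB :
    (fun (acc : Int) (c : Char) => if c ≠ ' ' then acc + (aldict.getD c 0) else acc)
      = (fun (acc : Int) (c : Char) => if 'a' ≤ c ∧ c ≤ 'z'
          then acc + (PySem.Int.mod ((c.toNat : Int) - 97) 9 + 1) else acc) := by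
  funext acc c
  by_cases hl : 'a' ≤ c ∧ c ≤ 'z'
  · have hs : c ≠ ' ' := by
      intro he; subst he; exact absurd hl.1 (by decide)
    rw [if_pos hl, if_pos hs, aldict_getD_eq, if_pos hl]
  · rw [if_neg hl, aldict_getD_eq, if_neg hl]
    split_ifs <;> simp

lemma foldB_nonneg (l : List Char) (a : Int) (ha : 0 ≤ a) :
    0 ≤ l.foldl (fun acc c => if 'a' ≤ c ∧ c ≤ 'z'
      then acc + (PySem.Int.mod ((c.toNat : Int) - 97) 9 + 1) else acc) a := by
  induction l generalizing a with
  | nil => simpa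
  | cons c l ih =>
    simp only [List.foldl_cons]
    split_ifs with h
    · exact ih _ (by have := PySem.Int.mod_nonneg ((c.toNat : Int) - 97) (by norm_num : (0:Int) < 9); omega)
    · exact ih _ ha

lemma digits_sum_pos {n : Nat} (hn : 0 < n) : 0 < (Nat.digits 10 n).sum := by
  rcases Nat.pos_iff_ne_zero.mp hn with hne
  have hnil : Nat.digits 10 n ≠ [] := Nat.digits_ne_nil_iff_ne_zero.mpr hne
  have hlast := Nat.getLast_digit_ne_zero 10 hne
  rcases Nat.eq_zero_or_pos (Nat.digits 10 n).sum with hz | hp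
  · exact absurd (List.sum_eq_zero_iff.mp hz _ (List.getLast_mem hnil)) hlast
  · exact hp

-- A's while loop equals the closed-form digital root on nonnegative input
lemma reduceA_eq_root (m : Nat) :
    reduceA (m : Int) = if (m : Int) = 0 then 0 else 1 + PySem.Int.mod ((m : Int) - 1) 9 := by
  induction m using Nat.strong_induction_on with
  | _ m ih =>
    rw [reduceA]
    by_cases h : 9 < (m : Int)
    · rw [dif_pos h, digitSumA_eq m]
      have hlt : (Nat.digits 10 m).sum < m := by
        have := digitSumA_toNat_lt (n := (m : Int)) h
        rw [digitSumA_eq m] at this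
        omega
      rw [ih _ hlt]
      have hs : 0 < (Nat.digits 10 m).sum := digits_sum_pos (by exact_mod_cast by omega : 0 < m)
      have hmod : m % 9 = (Nat.digits 10 m).sum % 9 := Nat.modEq_nine_digits_sum m
      rw [if_neg (by exact_mod_cast Nat.pos_iff_ne_zero.mp hs),
        if_neg (by exact_mod_cast (by omega : m ≠ 0)),
        PySem.Int.mod_eq_emod_of_pos (by norm_num), PySem.Int.mod_eq_emod_of_pos (by norm_num)]
      omega
    · rw [dif_neg h]
      have h9 : m ≤ 9 := by exact_mod_cast by omega
      interval_cases m <;> decide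

-- ===== VERDICT (by name: the statement is the Claim_ definition above) =====
theorem calculate_naamank_spec : Claim_equal_calculate_naamank := by
  intro name _
  unfold Spec_calculate_naamank calculate_naamank calculate_naamank_alt
  dsimp only
  rw [stepA_eq_stepB]
  set l := (PySem.Str.strip (PySem.Str.lower name)).toList with hl
  have hnn : 0 ≤ l.foldl (fun acc c => if 'a' ≤ c ∧ c ≤ 'z'
      then acc + (PySem.Int.mod ((c.toNat : Int) - 97) 9 + 1) else acc) 0 :=
    foldB_nonneg l 0 le_rfl
  rw [show l.foldl (fun acc c => if 'a' ≤ c ∧ c ≤ 'z'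
      then acc + (PySem.Int.mod ((c.toNat : Int) - 97) 9 + 1) else acc) 0
    = (((l.foldl (fun acc c => if 'a' ≤ c ∧ c ≤ 'z'
      then acc + (PySem.Int.mod ((c.toNat : Int) - 97) 9 + 1) else acc) 0).toNat : Nat) : Int)
    from (Int.toNat_of_nonneg hnn).symm, reduceA_eq_root]
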